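-- pv_equiv track=rewrite | github.com/viviluccioli/DSAN5400_final_project | nlp_analysis/src/nlp_analysis/topic_modeling.py | create_simple_topic_label
-- ===== SOURCE A (Python) =====
-- from typing import List, Dict, Tuple, Optional, Union
--
-- def create_simple_topic_label(topic_words: List[str]) -> str:
--     """
--     Create a very concise topic label from a list of topic words.
--
--     Args:
--         topic_words: List of words associated with a topic
--
--     Returns:
--         A concise, readable topic label (2-3 words max)
--     """
--     if not topic_words:
--         return "Misc."
--
--     # Filter out very common political terms for more distinctive topics
--     common_political_terms = {
--         'president', 'trump', 'biden', 'government', 'administration', 'state',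
--         'political', 'republican', 'democrat', 'gop', 'election'
--     }
--
--     # Keep terms that are more distinctive
--     filtered_words = [w for w in topic_words if w not in common_political_terms]
--
--     # If we filtered out all words, use one political term and one other word
--     if not filtered_words:
--         if len(topic_words) >= 2:
--             return f"{topic_words[0]}/{topic_words[1]}"
--         else:
--             return topic_words[0]
--
--     # Use at most 2 distinctive words for clarity
--     if len(filtered_words) >= 2:
--         return f"{filtered_words[0]}/{filtered_words[1]}"
--     else:
--         return filtered_words[0]
-- ===== SOURCE B (Python) =====
-- COMMON_POLITICAL_TERMS = frozenset({
--     'president', 'trump', 'biden', 'government', 'administration', 'state',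
--     'political', 'republican', 'democrat', 'gop', 'election'
-- })
--
--
-- def _scan(ws, found):
--     """Recursive early-exit scan: stop at the second distinctive word.
--     Returns the finished label, or the lone distinctive word, or None
--     when no distinctive word exists."""
--     if not ws:
--         return found
--     w, rest = ws[0], ws[1:]
--     if w in COMMON_POLITICAL_TERMS:
--         return _scan(rest, found)
--     if found is None:
--         return _scan(rest, w)
--     return found + "/" + w
--
--
-- def create_simple_topic_label(topic_words):
--     if not topic_words:
--         return "Misc."
--     res = _scan(topic_words, None)
--     if res is not None:
--         return res
--     # every word was a common political term: fall back to the originals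
--     if len(topic_words) == 1:
--         return topic_words[0]
--     return topic_words[0] + "/" + topic_words[1]
-- ===== Notes on version B (the rewrite author's own statement) =====
-- stated objective: alternative
-- what changed: Replaced A's build-the-whole-filtered-list-then-branch-on-its-length with a recursive early-exit scan carrying at most one distinctive word, which stops as soon as the second distinctive word is found and never materializes a filtered list.
import Mathlib
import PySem

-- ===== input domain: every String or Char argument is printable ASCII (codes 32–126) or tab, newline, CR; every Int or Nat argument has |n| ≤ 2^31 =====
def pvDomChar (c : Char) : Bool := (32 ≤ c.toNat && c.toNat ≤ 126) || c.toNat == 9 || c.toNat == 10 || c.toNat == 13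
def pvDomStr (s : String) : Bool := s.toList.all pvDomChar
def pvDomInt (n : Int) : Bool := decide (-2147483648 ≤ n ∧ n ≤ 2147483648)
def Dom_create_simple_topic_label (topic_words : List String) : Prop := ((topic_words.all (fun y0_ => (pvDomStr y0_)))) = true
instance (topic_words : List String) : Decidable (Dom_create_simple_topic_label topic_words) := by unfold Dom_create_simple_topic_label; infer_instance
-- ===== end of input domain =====

-- B replaces A's filter-then-branch-on-length with a recursive early-exit scan that
-- carries at most one distinctive word and stops at the second; objective: alternative.
-- ===== PORT A =====
def pvCommonPoliticalTerms : PySem.Set String :=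
  PySem.Set.ofList ["president", "trump", "biden", "government", "administration", "state",
    "political", "republican", "democrat", "gop", "election"]

def create_simple_topic_label (topic_words : List String) : String :=
  if topic_words = [] then "Misc."
  else
    let filtered_words := topic_words.filter (fun w => !(PySem.Set.contains pvCommonPoliticalTerms w))
    if filtered_words = [] then
      -- len(topic_words) >= 2 test and the index accesses, as the obvious pattern match
      match topic_words with
      | t0 :: t1 :: _ => t0 ++ "/" ++ t1
      | [t0] => t0
      | [] => "Misc."  -- unreachable: the outer guard excludes []
    else
      match filtered_words with
      | f0 :: f1 :: _ => f0 ++ "/" ++ f1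
      | [f0] => f0
      | [] => "Misc."  -- unreachable: this branch has filtered_words ≠ []

-- ===== PORT B =====
-- _scan from Source B: recursive early-exit scan; `found` holds the first distinctive word seen.
def pvScan : List String → Option String → Option String
  | [], found => found
  | w :: rest, found =>
    if PySem.Set.contains pvCommonPoliticalTerms w then pvScan rest found
    else
      match found with
      | none => pvScan rest (some w)
      | some f => some (f ++ "/" ++ w)

def create_simple_topic_label_alt (topic_words : List String) : String :=
  if topic_words = [] then "Misc."
  else
    match pvScan topic_words none with
    | some res => res
    | none =>
      match topic_words with
      | [t0] => t0
      | t0 :: t1 :: _ => t0 ++ "/" ++ t1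
      | [] => "Misc."  -- unreachable: the outer guard excludes []

-- ===== PRECONDITION & SPEC =====
def Spec_create_simple_topic_label (topic_words : List String) (out : String) : Prop := out = create_simple_topic_label_alt topic_words
instance (topic_words : List String) (out : String) : Decidable (Spec_create_simple_topic_label topic_words out) := by unfold Spec_create_simple_topic_label; infer_instance

-- ===== CLAIM (what is proved, stated in full; the proofs are below) =====
def Claim_equal_create_simple_topic_label : Prop := ∀ (topic_words : List String), Dom_create_simple_topic_label topic_words → Spec_create_simple_topic_label topic_words (create_simple_topic_label topic_words)

-- ===== LEMMAS AND PROOFS =====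
theorem pvScan_some (ws : List String) (f : String) :
    pvScan ws (some f) =
      some (match ws.filter (fun w => !(PySem.Set.contains pvCommonPoliticalTerms w)) with
            | [] => f
            | g :: _ => f ++ "/" ++ g) := by
  induction ws with
  | nil => rfl
  | cons w rest ih =>
    by_cases h : w ∈ pvCommonPoliticalTerms
    · simp [pvScan, List.filter, h, ih]
    · simp [pvScan, List.filter, h]

theorem pvScan_none (ws : List String) :
    pvScan ws none =
      match ws.filter (fun w => !(PySem.Set.contains pvCommonPoliticalTerms w)) with
      | [] => none
      | [f0] => some f0
      | f0 :: f1 :: _ => some (f0 ++ "/" ++ f1) := by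
  induction ws with
  | nil => rfl
  | cons w rest ih =>
    by_cases h : w ∈ pvCommonPoliticalTerms
    · simp [pvScan, List.filter, h, ih]
    · cases hr : rest.filter (fun w => !decide (w ∈ pvCommonPoliticalTerms)) <;>
        simp [pvScan, List.filter, h, pvScan_some, hr]

-- ===== VERDICT (by name: the statement is the Claim_ definition above) =====
theorem create_simple_topic_label_spec : Claim_equal_create_simple_topic_label := by
  intro topic_words _
  unfold Spec_create_simple_topic_label create_simple_topic_label create_simple_topic_label_alt
  by_cases h : topic_words = []
  · simp [h]
  · simp only [if_neg h]
    rw [pvScan_none]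
    cases hf : topic_words.filter (fun w => !(PySem.Set.contains pvCommonPoliticalTerms w)) with
    | nil =>
      simp only []
      match topic_words, h with
      | [t0], _ => rfl
      | t0 :: t1 :: _, _ => rfl
    | cons f0 rest =>
      cases rest <;> simp
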